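-- pv_equiv track=rewrite | github.com/Adhikram/Study_Resources | DSA/Python/Questions/String/MakeStringEmpty.py | last_non_empty_string
-- ===== SOURCE A (Python) =====
-- from collections import defaultdict
--
-- def last_non_empty_string(s: str) -> str:
--     char_frequency = defaultdict(int)
--     char_last_index = {}
--
--     # Track frequencies and last indices
--     for i, char in enumerate(s):
--         char_last_index[char] = i
--         char_frequency[char] += 1
--
--     # Find maximum frequency
--     max_frequency = max(char_frequency.values())
--
--     # Build result string
--     result = []
--     for i, char in enumerate(s):
--         if char_frequency[char] == max_frequency and char_last_index[char] == i:
--             result.append(char)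
--
--     return "".join(result)
-- ===== SOURCE B (Python) =====
-- def last_non_empty_string(s: str) -> str:
--     freq = {}
--     last = {}
--     for i, ch in enumerate(s):
--         freq[ch] = freq.get(ch, 0) + 1
--         last[ch] = i
--     max_frequency = max(freq.values())
--     candidates = sorted(((last[ch], ch) for ch in freq if freq[ch] == max_frequency),
--                         key=lambda t: t[0])
--     return "".join(ch for _, ch in candidates)
-- ===== Notes on version B (the rewrite author's own statement) =====
-- stated objective: alternative
-- what changed: Instead of a second full scan of s testing each position against the frequency and last-index dicts, B collects the max-frequency characters from the dict once and sorts the few (last_index, char) candidates by last index.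
import Mathlib
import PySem

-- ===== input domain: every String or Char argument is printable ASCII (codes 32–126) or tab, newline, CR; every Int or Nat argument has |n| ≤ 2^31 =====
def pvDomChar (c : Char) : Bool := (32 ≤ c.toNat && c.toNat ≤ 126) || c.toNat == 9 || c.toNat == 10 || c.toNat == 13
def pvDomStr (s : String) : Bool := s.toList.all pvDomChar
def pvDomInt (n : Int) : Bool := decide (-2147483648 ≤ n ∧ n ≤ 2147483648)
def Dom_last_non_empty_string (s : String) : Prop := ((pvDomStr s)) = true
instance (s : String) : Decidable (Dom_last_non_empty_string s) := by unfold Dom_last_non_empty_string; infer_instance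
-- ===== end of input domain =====

-- B replaces A's second full scan of s by sorting the (last_index, char) candidates
-- collected straight from the dicts (objective: alternative decomposition, similar cost).

-- ===== PORT A =====
-- one pass filling char_last_index (st.1) and char_frequency (st.2), then a second
-- scan of s keeping chars of maximal frequency at their last index
def last_non_empty_string (s : String) : String :=
  let cs := s.toList
  let st := (PySem.List.enumerate cs).foldl
      (fun (st : PySem.Dict Char Int × PySem.Dict Char Int) p =>
        (st.1.insert p.2 p.1, st.2.modify p.2 0 (· + 1)))
      (PySem.Dict.empty, PySem.Dict.empty)
  match PySem.List.max? st.2.values (fun v => v) with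
  | none => ""          -- unreachable under Pre_: Python's max() raises ValueError on ""
  | some m =>
    let result := (PySem.List.enumerate cs).foldl
      (fun acc p => if st.2.getD p.2 0 = m ∧ st.1.getD p.2 0 = p.1 then acc ++ [p.2] else acc)
      ([] : List Char)
    String.ofList result

-- ===== PORT B =====
-- same single pass (freq = st.1, last = st.2), then sort the few max-frequency
-- candidates by stored last index instead of re-scanning s
def last_non_empty_string_alt (s : String) : String :=
  let cs := s.toList
  let st := (PySem.List.enumerate cs).foldl
      (fun (st : PySem.Dict Char Int × PySem.Dict Char Int) p =>
        (st.1.insert p.2 (st.1.getD p.2 0 + 1), st.2.insert p.2 p.1))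
      (PySem.Dict.empty, PySem.Dict.empty)
  match PySem.List.max? st.1.values (fun v => v) with
  | none => ""          -- unreachable under Pre_: Python's max() raises ValueError on ""
  | some m =>
    let candidates := PySem.List.sorted
      ((st.1.keys.filter (fun ch => decide (st.1.getD ch 0 = m))).map
        (fun ch => (st.2.getD ch 0, ch)))
      (fun t => t.1)
    String.ofList (candidates.map (fun t => t.2))

-- ===== PRECONDITION & SPEC =====
-- Pre_ excludes only the empty string, on which the Python A (and B) raises ValueError (max() of an empty dict).
def Pre_last_non_empty_string (s : String) : Prop := s ≠ ""
instance (s : String) : Decidable (Pre_last_non_empty_string s) := by unfold Pre_last_non_empty_string; infer_instance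
def pvWitness_last_non_empty_string : String := "aabbc"

def Spec_last_non_empty_string (s : String) (out : String) : Prop := out = last_non_empty_string_alt s
instance (s : String) (out : String) : Decidable (Spec_last_non_empty_string s out) := by unfold Spec_last_non_empty_string; infer_instance

-- ===== CLAIM (what is proved, stated in full; the proofs are below) =====
def Claim_equal_last_non_empty_string : Prop := ∀ (s : String), Dom_last_non_empty_string s → Pre_last_non_empty_string s → Spec_last_non_empty_string s (last_non_empty_string s)

-- ===== LEMMAS AND PROOFS =====

-- the last-index dict built by both first passes
def pvLast (cs : List Char) : PySem.Dict Char Int :=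
  (PySem.List.enumerate cs).foldl (fun d p => d.insert p.2 p.1) PySem.Dict.empty

-- lookup in an insert-fold is the LAST inserted value for that key
lemma pvLastFold_get? (l : List (Int × Char)) (d : PySem.Dict Char Int) (ch : Char) :
    (l.foldl (fun d p => d.insert p.2 p.1) d).get? ch =
      (match l.reverse.find? (fun p => p.2 == ch) with
       | some p => some p.1
       | none => d.get? ch) := by
  induction l generalizing d with
  | nil => simp
  | cons p0 tl ih =>
    simp only [List.foldl_cons, List.reverse_cons, List.find?_append]
    rw [ih]
    cases htl : tl.reverse.find? (fun p => p.2 == ch) with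
    | some q => simp
    | none =>
      by_cases h : p0.2 = ch
      · subst h
        simp [PySem.Dict.get?_insert_self]
      · simp [PySem.Dict.get?_insert, h]
        exact fun hc => absurd hc.symm h

lemma pvLast_get? (cs : List Char) (ch : Char) :
    (pvLast cs).get? ch =
      (match (PySem.List.enumerate cs).reverse.find? (fun p => p.2 == ch) with
       | some p => some p.1
       | none => none) := by
  rw [pvLast, pvLastFold_get?]
  cases (PySem.List.enumerate cs).reverse.find? (fun p => p.2 == ch) <;> simp

-- enumerate: first components are distinct and increasing
lemma pvEnum_inj (cs : List Char) :
    ∀ p ∈ PySem.List.enumerate cs, ∀ q ∈ PySem.List.enumerate cs, p.1 = q.1 → p = q := by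
  have hnd : ((PySem.List.enumerate cs).map (fun p => p.1)).Nodup := by
    rw [PySem.List.map_fst_enumerate]
    exact PySem.List.nodup_pyRange_one 0 (0 + cs.length)
  exact fun p hp q hq h => List.inj_on_of_nodup_map hnd hp hq h

lemma pvEnum_pairwise (cs : List Char) :
    (PySem.List.enumerate cs).Pairwise (fun p q => p.1 < q.1) := by
  have := PySem.List.pairwise_lt_pyRange_one (a := 0) (b := 0 + (cs.length : Int))
  rw [← PySem.List.map_fst_enumerate cs 0, List.pairwise_map] at this
  exact this

-- every char of cs has a last-occurrence pair in enumerate cs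
lemma pvLast_exists (cs : List Char) (ch : Char) (h : ch ∈ cs) :
    ∃ p, p ∈ PySem.List.enumerate cs ∧ p.2 = ch ∧ (pvLast cs).getD ch 0 = p.1 := by
  have hmem : ∃ p ∈ (PySem.List.enumerate cs).reverse, (fun (p : Int × Char) => p.2 == ch) p = true := by
    have : ch ∈ (PySem.List.enumerate cs).map (fun p => p.2) := by
      rw [PySem.List.map_snd_enumerate]; exact h
    obtain ⟨p, hp, hp2⟩ := List.mem_map.mp this
    exact ⟨p, List.mem_reverse.mpr hp, by simp [hp2]⟩
  obtain ⟨q, hq⟩ := List.find?_isSome.mpr hmem |> Option.isSome_iff_exists.mp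
  refine ⟨q, ?_, ?_, ?_⟩
  · exact List.mem_reverse.mp (List.mem_of_find?_eq_some hq)
  · simpa using List.find?_some hq
  · rw [PySem.Dict.getD_eq_get?_getD, pvLast_get?, hq]
    rfl

-- ===== the main equality, per side =====

-- the frequency fold of each port is Counter(s)
lemma pvFreqA (cs : List Char) :
    (PySem.List.enumerate cs).foldl
      (fun (d : PySem.Dict Char Int) p => d.modify p.2 0 (· + 1)) PySem.Dict.empty
      = PySem.Dict.counter cs := by
  conv_rhs => rw [PySem.Dict.counter_eq_foldl, ← PySem.List.map_snd_enumerate cs 0]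
  rw [List.foldl_map]

lemma pvFreqB (cs : List Char) :
    (PySem.List.enumerate cs).foldl
      (fun (d : PySem.Dict Char Int) p => d.insert p.2 (d.getD p.2 0 + 1)) PySem.Dict.empty
      = PySem.Dict.counter cs := by
  conv_rhs => rw [← PySem.Dict.foldl_insert_getD_add_one_eq_counter,
                  ← PySem.List.map_snd_enumerate cs 0]
  rw [List.foldl_map]

-- A reshaped: counter + filter over enumerate
lemma pvA_eq (s : String) :
    last_non_empty_string s =
      (match PySem.List.max? (PySem.Dict.counter s.toList).values (fun v => v) with
       | none => ""
       | some m =>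
         String.ofList (((PySem.List.enumerate s.toList).filter
             (fun p => decide ((PySem.Dict.counter s.toList).getD p.2 0 = m ∧
                               (pvLast s.toList).getD p.2 0 = p.1))).map (fun p => p.2))) := by
  unfold last_non_empty_string
  dsimp only
  have hpair : (PySem.List.enumerate s.toList).foldl
      (fun (st : PySem.Dict Char Int × PySem.Dict Char Int) (p : Int × Char) =>
        (st.1.insert p.2 p.1, st.2.modify p.2 0 (· + 1)))
      (PySem.Dict.empty, PySem.Dict.empty)
      = ((PySem.List.enumerate s.toList).foldl (fun d p => d.insert p.2 p.1) PySem.Dict.empty,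
         (PySem.List.enumerate s.toList).foldl (fun d p => d.modify p.2 0 (· + 1)) PySem.Dict.empty) :=
    PySem.List.foldl_prod_mk (fun (d : PySem.Dict Char Int) (p : Int × Char) => d.insert p.2 p.1) (fun (d : PySem.Dict Char Int) (p : Int × Char) => d.modify p.2 0 (· + 1)) _ _ _
  rw [hpair]
  dsimp only
  rw [pvFreqA s.toList]
  cases PySem.List.max? (PySem.Dict.counter s.toList).values (fun v => v) with
  | none => rfl
  | some m =>
    show String.ofList _ = String.ofList _
    rw [show (PySem.List.enumerate s.toList).foldl
          (fun (d : PySem.Dict Char Int) (p : Int × Char) => d.insert p.2 p.1) PySem.Dict.empty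
          = pvLast s.toList from rfl]
    rw [PySem.List.foldl_append_ite
      (p := fun p : Int × Char => (PySem.Dict.counter s.toList).getD p.2 0 = m ∧
            (pvLast s.toList).getD p.2 0 = p.1) (f := fun p : Int × Char => p.2)]
    rfl

-- B reshaped: counter + sorted candidates
lemma pvB_eq (s : String) :
    last_non_empty_string_alt s =
      (match PySem.List.max? (PySem.Dict.counter s.toList).values (fun v => v) with
       | none => ""
       | some m =>
         String.ofList ((PySem.List.sorted
             (((PySem.Dict.counter s.toList).keys.filter
                 (fun ch => decide ((PySem.Dict.counter s.toList).getD ch 0 = m))).map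
               (fun ch => ((pvLast s.toList).getD ch 0, ch)))
             (fun t => t.1)).map (fun t => t.2))) := by
  unfold last_non_empty_string_alt
  dsimp only
  have hpair : (PySem.List.enumerate s.toList).foldl
      (fun (st : PySem.Dict Char Int × PySem.Dict Char Int) (p : Int × Char) =>
        (st.1.insert p.2 (st.1.getD p.2 0 + 1), st.2.insert p.2 p.1))
      (PySem.Dict.empty, PySem.Dict.empty)
      = ((PySem.List.enumerate s.toList).foldl (fun d p => d.insert p.2 (d.getD p.2 0 + 1)) PySem.Dict.empty,
         (PySem.List.enumerate s.toList).foldl (fun d p => d.insert p.2 p.1) PySem.Dict.empty) :=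
    PySem.List.foldl_prod_mk (fun (d : PySem.Dict Char Int) (p : Int × Char) => d.insert p.2 (d.getD p.2 0 + 1)) (fun (d : PySem.Dict Char Int) (p : Int × Char) => d.insert p.2 p.1) _ _ _
  rw [hpair]
  dsimp only
  rw [pvFreqB s.toList]
  cases PySem.List.max? (PySem.Dict.counter s.toList).values (fun v => v) with
  | none => rfl
  | some m =>
    show String.ofList _ = String.ofList _
    rw [show (PySem.List.enumerate s.toList).foldl
          (fun (d : PySem.Dict Char Int) (p : Int × Char) => d.insert p.2 p.1) PySem.Dict.empty
          = pvLast s.toList from rfl]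

-- the heart: for any m, the sorted candidate list equals A's filtered scan
lemma pvCore (cs : List Char) (m : Int) :
    PySem.List.sorted
        (((PySem.Dict.counter cs).keys.filter
            (fun ch => decide ((PySem.Dict.counter cs).getD ch 0 = m))).map
          (fun ch => ((pvLast cs).getD ch 0, ch)))
        (fun t => t.1)
      = (PySem.List.enumerate cs).filter
          (fun p => decide ((PySem.Dict.counter cs).getD p.2 0 = m ∧
                            (pvLast cs).getD p.2 0 = p.1)) := by
  set F := PySem.Dict.counter cs with hF
  set L := pvLast cs with hL
  set ys := (PySem.List.enumerate cs).filter
      (fun p => decide (F.getD p.2 0 = m ∧ L.getD p.2 0 = p.1)) with hys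
  have hysE : ∀ p ∈ ys, p ∈ PySem.List.enumerate cs ∧ F.getD p.2 0 = m ∧ L.getD p.2 0 = p.1 := by
    intro p hp
    have := List.mem_filter.mp hp
    simpa using this
  -- ys is pairwise increasing in the first component
  have hpw : ys.Pairwise (fun p q : Int × Char => p.1 < q.1) :=
    (pvEnum_pairwise cs).sublist List.filter_sublist
  -- character lists: nodup on both sides
  have hE_nodup : (PySem.List.enumerate cs).Nodup := by
    have hnd : ((PySem.List.enumerate cs).map (fun p => p.1)).Nodup := by
      rw [PySem.List.map_fst_enumerate]
      exact PySem.List.nodup_pyRange_one 0 (0 + cs.length)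
    exact hnd.of_map
  have hys_nodup : ys.Nodup := hE_nodup.sublist List.filter_sublist
  have hsnd_inj : ∀ p ∈ ys, ∀ q ∈ ys, (fun t : Int × Char => t.2) p = (fun t : Int × Char => t.2) q → p = q := by
    intro p hp q hq h
    have h' : p.2 = q.2 := h
    obtain ⟨hpE, _, hpl⟩ := hysE p hp
    obtain ⟨hqE, _, hql⟩ := hysE q hq
    apply pvEnum_inj cs p hpE q hqE
    rw [← hpl, ← hql, h']
  have hys_snd_nodup : (ys.map (fun t => t.2)).Nodup := List.Nodup.map_on hsnd_inj hys_nodup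
  have hkf_nodup : (F.keys.filter (fun ch => decide (F.getD ch 0 = m))).Nodup :=
    (PySem.Dict.nodup_keys_counter cs).filter _
  -- same members
  have hmem : ∀ ch, ch ∈ ys.map (fun t => t.2) ↔
      ch ∈ F.keys.filter (fun ch => decide (F.getD ch 0 = m)) := by
    intro ch
    constructor
    · intro h
      obtain ⟨p, hp, hp2⟩ := List.mem_map.mp h
      obtain ⟨hpE, hpf, _⟩ := hysE p hp
      have hchcs : ch ∈ cs := by
        rw [← PySem.List.map_snd_enumerate cs 0, ← hp2]
        exact List.mem_map_of_mem hpE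
      refine List.mem_filter.mpr ⟨?_, by simpa [hp2] using hpf⟩
      rw [hF, PySem.Dict.keys_counter]
      exact (PySem.Set.mem_ofList cs ch).mpr hchcs
    · intro h
      obtain ⟨hk, hm'⟩ := List.mem_filter.mp h
      have hchcs : ch ∈ cs := by
        rw [hF, PySem.Dict.keys_counter] at hk
        exact (PySem.Set.mem_ofList cs ch).mp hk
      obtain ⟨p, hpE, hp2, hpl⟩ := pvLast_exists cs ch hchcs
      have hQ : p ∈ ys := by
        refine List.mem_filter.mpr ⟨hpE, ?_⟩
        simp only [decide_eq_true_eq]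
        exact ⟨by rw [hp2]; simpa using hm', by rw [hp2, hL]; exact hpl⟩
      rw [← hp2]
      exact List.mem_map_of_mem hQ
  have hperm_chars : (ys.map (fun t => t.2)).Perm
      (F.keys.filter (fun ch => decide (F.getD ch 0 = m))) :=
    (List.perm_ext_iff_of_nodup hys_snd_nodup hkf_nodup).mpr hmem
  -- lift the char permutation to the pair lists
  have hys_back : (ys.map (fun t => t.2)).map (fun ch => (L.getD ch 0, ch)) = ys := by
    rw [List.map_map]
    have : ∀ p ∈ ys, ((fun ch => (L.getD ch 0, ch)) ∘ (fun t : Int × Char => t.2)) p = id p := by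
      intro p hp
      obtain ⟨_, _, hpl⟩ := hysE p hp
      simp [Function.comp, hpl]
    rw [List.map_congr_left this, List.map_id]
  have hperm : ys.Perm
      ((F.keys.filter (fun ch => decide (F.getD ch 0 = m))).map (fun ch => (L.getD ch 0, ch))) := by
    rw [← hys_back]
    exact List.Perm.map _ hperm_chars
  exact PySem.List.sorted_eq_of_perm_of_pairwise_lt _ ys (fun t => t.1) hperm hpw

lemma pvMain (s : String) : last_non_empty_string s = last_non_empty_string_alt s := by
  rw [pvA_eq, pvB_eq]
  cases PySem.List.max? (PySem.Dict.counter s.toList).values (fun v => v) with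
  | none => rfl
  | some m => simp only [pvCore]

-- ===== VERDICT (by name: the statement is the Claim_ definition above) =====
theorem last_non_empty_string_spec : Claim_equal_last_non_empty_string := by
  intro s _ _
  unfold Spec_last_non_empty_string
  exact pvMain s
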